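-- pv_equiv track=rewrite | github.com/titimar16/IA-NINJA | utilsQuixo.py | generateWeightMyself
-- ===== SOURCE A (Python) =====
-- def generateWeightMyself(mylist):
--     #Calcul du nombre de rond aligné on possede
--     weight = 0
--
--     indexes = getMyselfCells(mylist)
--     ## Horizontalement
--     for t in range(5):
--         num = 0
--         for i in range((t * 5) ,(5 * t) + 5):
--             if i in indexes:
--                 num += 1
--         for i in range(num):
--             weight += (i + 1)**2
--         if num == 5:
--             return 1000000000
--
--     ## Verticalement
--     for t in range(5):
--         num = 0
--         for i in range(t,t+21,5):
--             if i in indexes: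
--                 num += 1
--         for i in range(num):
--             weight += (i + 1)**2
--         if num == 5:
--             return 1000000000
--
--     ## Diagonale 0,0 -> 4,4
--
--     num = 0
--     for i in range(5):
--         if convertMatrix(i,i) in indexes:
--             num += 1
--     for i in range(num):
--         weight += (i + 1)**2
--     if num == 5:
--         return 1000000000
--
--     ## Diagonale 4,0 -> 0,4
--
--     num = 0
--     for i in range(5):
--         if convertMatrix(4-i,i) in indexes:
--             num += 1
--     for i in range(num):
--         weight += (i + 1)**2
--     if num == 5:
--         return 1000000000
--     return weight
--
-- def getMyselfCells(listebtn):
--     # return list of index Myself Cells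
--     mylist = []
--     for i in range(len(listebtn)):
--         if checkIfValueO(listebtn[i]) == True:
--             mylist.append(i)
--     return mylist
--
-- def convertMatrix(columns,rows):
--     return columns + rows * 5
--
-- def checkIfValueO(btn):
--     if btn == "casevide2.png":
--         return True
--     return False
-- ===== SOURCE B (Python) =====
-- def generateWeightMyself(mylist):
--     # one pass over the cells: each own cell emits the ids of the lines through it
--     ids = []
--     for i, btn in enumerate(mylist):
--         if btn == "casevide2.png" and i < 25:
--             r, c = i // 5, i % 5
--             ids.append(r)          # horizontal line r
--             ids.append(5 + c)      # vertical line c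
--             if r == c:
--                 ids.append(10)     # main diagonal
--             if r + c == 4:
--                 ids.append(11)     # anti-diagonal
--     weight = 0
--     for j in range(12):
--         n = ids.count(j)
--         if n == 5:
--             return 1000000000
--         weight += n * (n + 1) * (2 * n + 1) // 6
--     return weight
-- ===== Notes on version B (the rewrite author's own statement) =====
-- stated objective: alternative
-- what changed: B inverts the traversal: one pass over the board cells in which each own cell emits the ids of the (up to 4) lines through it, then each of the 12 line ids is counted and scored with the closed form n*(n+1)*(2n+1)//6, instead of A's line-driven scan that tests each cell of each of the 12 lines for membership and sums squares with an inner loop.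
import Mathlib
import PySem

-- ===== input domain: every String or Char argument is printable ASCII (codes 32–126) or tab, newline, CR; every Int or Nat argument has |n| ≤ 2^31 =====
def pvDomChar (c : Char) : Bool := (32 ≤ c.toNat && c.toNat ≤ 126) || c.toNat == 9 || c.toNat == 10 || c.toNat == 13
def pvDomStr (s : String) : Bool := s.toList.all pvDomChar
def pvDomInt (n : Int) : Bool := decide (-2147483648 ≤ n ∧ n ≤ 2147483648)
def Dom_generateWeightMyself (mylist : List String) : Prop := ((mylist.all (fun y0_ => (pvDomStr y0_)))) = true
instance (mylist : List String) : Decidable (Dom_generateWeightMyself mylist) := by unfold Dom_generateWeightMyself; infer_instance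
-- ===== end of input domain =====

-- B inverts the traversal: one pass over cells emitting the ids of the lines through each own
-- cell, then counts each of the 12 line ids and scores with a closed form (alternative algorithm).

-- ===== PORT A =====
def checkIfValueO (btn : String) : Bool :=
  if btn == "casevide2.png" then true else false

def convertMatrix (columns rows : Int) : Int := columns + rows * 5

def getMyselfCells (listebtn : List String) : List Int :=
  (PySem.List.pyRange 0 (PySem.List.len listebtn) 1).foldl
    (fun mylist i =>
      if checkIfValueO (PySem.List.pyGetD listebtn i "") then mylist ++ [i] else mylist) []

-- inner 'num' loop of A ('for i in …: if i in indexes: num += 1')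
def aNum (indexes : List Int) (rng : List Int) : Int :=
  rng.foldl (fun num i => if indexes.contains i then num + 1 else num) 0

-- 'for i in range(num): weight += (i + 1)**2'
def aAddSq (num : Int) (weight : Int) : Int :=
  (PySem.List.pyRange 0 num 1).foldl (fun w i => w + (i + 1) ^ 2) weight

-- 'for t in range(5):' horizontal block; 'none' = early 'return 1000000000'
def aHoriz (indexes : List Int) : List Int → Int → Option Int
  | [], weight => some weight
  | t :: ts, weight =>
    let num := aNum indexes (PySem.List.pyRange (t * 5) (5 * t + 5) 1)
    let weight := aAddSq num weight
    if num = 5 then none else aHoriz indexes ts weight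

-- 'for t in range(5):' vertical block
def aVert (indexes : List Int) : List Int → Int → Option Int
  | [], weight => some weight
  | t :: ts, weight =>
    let num := aNum indexes (PySem.List.pyRange t (t + 21) 5)
    let weight := aAddSq num weight
    if num = 5 then none else aVert indexes ts weight

def generateWeightMyself (mylist : List String) : Int :=
  let indexes := getMyselfCells mylist
  match aHoriz indexes (PySem.List.pyRange 0 5 1) 0 with
  | none => 1000000000
  | some weight =>
    match aVert indexes (PySem.List.pyRange 0 5 1) weight with
    | none => 1000000000
    | some weight =>
      -- diagonal 0,0 -> 4,4
      let num := (PySem.List.pyRange 0 5 1).foldl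
        (fun num i => if indexes.contains (convertMatrix i i) then num + 1 else num) (0 : Int)
      let weight := aAddSq num weight
      if num = 5 then 1000000000
      else
        -- diagonal 4,0 -> 0,4
        let num2 := (PySem.List.pyRange 0 5 1).foldl
          (fun num i => if indexes.contains (convertMatrix (4 - i) i) then num + 1 else num) (0 : Int)
        let weight := aAddSq num2 weight
        if num2 = 5 then 1000000000 else weight

-- ===== PORT B =====
-- the cell pass: each own cell with index < 25 appends the ids of its lines
def bIds (mylist : List String) : List Int :=
  (PySem.List.enumerate mylist).foldl
    (fun ids p =>
      if p.2 == "casevide2.png" && decide (p.1 < 25) then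
        let r := PySem.Int.floordiv p.1 5
        let c := PySem.Int.mod p.1 5
        let ids := ids ++ [r]
        let ids := ids ++ [5 + c]
        let ids := if r = c then ids ++ [10] else ids
        if r + c = 4 then ids ++ [11] else ids
      else ids) []

-- 'for j in range(12): n = ids.count(j); …'
def bLoop (ids : List Int) : List Int → Int → Int
  | [], weight => weight
  | j :: js, weight =>
    let n : Int := (PySem.List.count ids j : Int)
    if n = 5 then 1000000000
    else bLoop ids js (weight + PySem.Int.floordiv (n * (n + 1) * (2 * n + 1)) 6)

def generateWeightMyself_alt (mylist : List String) : Int :=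
  bLoop (bIds mylist) (PySem.List.pyRange 0 12 1) 0

-- ===== PRECONDITION & SPEC =====
def Spec_generateWeightMyself (mylist : List String) (out : Int) : Prop := out = generateWeightMyself_alt mylist
instance (mylist : List String) (out : Int) : Decidable (Spec_generateWeightMyself mylist out) := by unfold Spec_generateWeightMyself; infer_instance

-- ===== CLAIM (what is proved, stated in full; the proofs are below) =====
def Claim_equal_generateWeightMyself : Prop := ∀ (mylist : List String), Dom_generateWeightMyself mylist → Spec_generateWeightMyself mylist (generateWeightMyself mylist)

-- ===== LEMMAS AND PROOFS =====

-- the 12 lines, in A's visiting order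
def linesA : List (List Int) :=
  [[0,1,2,3,4],[5,6,7,8,9],[10,11,12,13,14],[15,16,17,18,19],[20,21,22,23,24],
   [0,5,10,15,20],[1,6,11,16,21],[2,7,12,17,22],[3,8,13,18,23],[4,9,14,19,24],
   [0,6,12,18,24],[4,8,12,16,20]]

def lineA (j : Int) : List Int := linesA.getD j.toNat []

-- line ids emitted by cell i in B
def gIds (i : Int) : List Int :=
  if i < 25 then
    [PySem.Int.floordiv i 5, 5 + PySem.Int.mod i 5]
      ++ (if PySem.Int.floordiv i 5 = PySem.Int.mod i 5 then [10] else [])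
      ++ (if PySem.Int.floordiv i 5 + PySem.Int.mod i 5 = 4 then [11] else [])
  else []

-- sum of the first n squares, as A's inner loop accumulates it
def sqsum : Nat → Int
  | 0 => 0
  | n + 1 => sqsum n + ((n : Int) + 1) ^ 2

lemma aAddSq_eq (n : Nat) (w : Int) : aAddSq (n : Int) w = w + sqsum n := by
  induction n generalizing w with
  | zero => simp [aAddSq, sqsum, PySem.List.pyRange]
  | succ n ih =>
    have : aAddSq ((n : Int) + 1) w =
        (PySem.List.pyRange 0 (n : Int) 1 ++ [(n : Int)]).foldl (fun w i => w + (i + 1) ^ 2) w := by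
      rw [aAddSq, PySem.List.pyRange_one_succ_right (by positivity)]
    rw [show (((n + 1 : Nat) : Int)) = (n : Int) + 1 by push_cast; ring, this, List.foldl_append]
    simp only [List.foldl_cons, List.foldl_nil]
    rw [show ((PySem.List.pyRange 0 (n : Int) 1).foldl (fun w i => w + (i + 1) ^ 2) w) = aAddSq (n : Int) w from rfl, ih]
    simp [sqsum]; ring

lemma six_sqsum (n : Nat) : 6 * sqsum n = (n : Int) * ((n : Int) + 1) * (2 * (n : Int) + 1) := by
  induction n with
  | zero => simp [sqsum]
  | succ n ih => rw [sqsum]; push_cast; push_cast at ih; ring_nf; ring_nf at ih; linarith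

lemma sqsum_closed (n : Nat) :
    sqsum n = PySem.Int.floordiv ((n : Int) * ((n : Int) + 1) * (2 * (n : Int) + 1)) 6 := by
  rw [← six_sqsum n, PySem.Int.floordiv_eq_ediv_of_pos (by norm_num)]
  exact (Int.mul_ediv_cancel_left _ (by norm_num)).symm

lemma aNum_eq (idx : List Int) (l : List Int) :
    aNum idx l = ((l.countP fun i => idx.contains i : Nat) : Int) := by
  simpa [aNum] using PySem.List.foldl_count_if (fun i => idx.contains i) l 0

-- A's per-line step, generically over a list of line index-sequences
def loopA (idx : List Int) : List (List Int) → Int → Option Int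
  | [], w => some w
  | l :: ls, w =>
    let num := aNum idx l
    if num = 5 then none else loopA idx ls (aAddSq num w)

lemma aHoriz_loop (idx : List Int) (ts : List Int) (w : Int) :
    aHoriz idx ts w = loopA idx (ts.map fun t => PySem.List.pyRange (t * 5) (5 * t + 5) 1) w := by
  induction ts generalizing w with
  | nil => rfl
  | cons t ts ih => simp only [aHoriz, loopA, List.map_cons]; split_ifs <;> simp [ih]

lemma aVert_loop (idx : List Int) (ts : List Int) (w : Int) :
    aVert idx ts w = loopA idx (ts.map fun t => PySem.List.pyRange t (t + 21) 5) w := by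
  induction ts generalizing w with
  | nil => rfl
  | cons t ts ih => simp only [aVert, loopA, List.map_cons]; split_ifs <;> simp [ih]

lemma loopA_append (idx : List Int) (xs ys : List (List Int)) (w : Int) :
    loopA idx (xs ++ ys) w =
      match loopA idx xs w with
      | none => none
      | some w' => loopA idx ys w' := by
  induction xs generalizing w with
  | nil => rfl
  | cons l ls ih => simp only [loopA, List.cons_append]; split_ifs <;> simp [ih]

-- A as the generic line loop over linesA
lemma A_eq_loopA (mylist : List String) :
    generateWeightMyself mylist =
      match loopA (getMyselfCells mylist) linesA 0 with
      | none => 1000000000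
      | some w => w := by
  unfold generateWeightMyself
  rw [show linesA =
      ((PySem.List.pyRange 0 5 1).map fun t => PySem.List.pyRange (t * 5) (5 * t + 5) 1)
      ++ ((PySem.List.pyRange 0 5 1).map fun t => PySem.List.pyRange t (t + 21) 5)
      ++ [(PySem.List.pyRange 0 5 1).map (fun i => convertMatrix i i),
          (PySem.List.pyRange 0 5 1).map (fun i => convertMatrix (4 - i) i)] by decide]
  rw [loopA_append, loopA_append]
  simp only [← aHoriz_loop, ← aVert_loop]
  cases h1 : aHoriz (getMyselfCells mylist) (PySem.List.pyRange 0 5 1) 0 with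
  | none => rfl
  | some w1 =>
    dsimp only
    cases h2 : aVert (getMyselfCells mylist) (PySem.List.pyRange 0 5 1) w1 with
    | none => rfl
    | some w2 =>
      dsimp only
      rw [show ((PySem.List.pyRange 0 5 1).foldl
            (fun num i => if (getMyselfCells mylist).contains (convertMatrix i i) then num + 1 else num) (0 : Int))
          = aNum (getMyselfCells mylist) ((PySem.List.pyRange 0 5 1).map fun i => convertMatrix i i) by
        simp [aNum, List.foldl_map]]
      rw [show ((PySem.List.pyRange 0 5 1).foldl
            (fun num i => if (getMyselfCells mylist).contains (convertMatrix (4 - i) i) then num + 1 else num) (0 : Int))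
          = aNum (getMyselfCells mylist) ((PySem.List.pyRange 0 5 1).map fun i => convertMatrix (4 - i) i) by
        simp [aNum, List.foldl_map]]
      simp only [loopA]
      split_ifs <;> rfl

-- getMyselfCells is the filtered index range
lemma cells_eq_filter (mylist : List String) :
    getMyselfCells mylist =
      (PySem.List.pyRange 0 (PySem.List.len mylist) 1).filter
        (fun i => PySem.List.pyGetD mylist i "" == "casevide2.png") := by
  unfold getMyselfCells
  rw [PySem.List.foldl_append_if_eq_filter]
  simp only [List.nil_append]
  congr 1
  funext i
  simp [checkIfValueO]
  rw [Bool.eq_iff_iff]; simp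

lemma filter_flatMap (l : List Int) (p : Int → Bool) (g : Int → List Int) :
    (l.filter p).flatMap g = l.flatMap (fun i => if p i then g i else []) := by
  induction l with
  | nil => rfl
  | cons x xs ih => by_cases h : p x <;> simp [h, ih]

-- B's cell pass is a flatMap of gIds over the own cells
lemma bIds_eq (mylist : List String) :
    bIds mylist = (getMyselfCells mylist).flatMap gIds := by
  unfold bIds
  have hbody : (fun (ids : List Int) (p : Int × String) =>
      if p.2 == "casevide2.png" && decide (p.1 < 25) then
        let r := PySem.Int.floordiv p.1 5
        let c := PySem.Int.mod p.1 5
        let ids := ids ++ [r]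
        let ids := ids ++ [5 + c]
        let ids := if r = c then ids ++ [10] else ids
        if r + c = 4 then ids ++ [11] else ids
      else ids)
      = fun ids p => ids ++ (if p.2 == "casevide2.png" then gIds p.1 else []) := by
    funext ids p
    by_cases hm : p.2 == "casevide2.png" <;> by_cases h25 : p.1 < 25 <;>
      simp only [hm, h25, gIds, if_pos, Bool.true_and, Bool.false_and, decide_true,
        decide_false, if_false, Bool.and_self, List.append_nil] <;>
      split_ifs <;> simp_all
  rw [hbody, PySem.List.foldl_append_eq_flatMap, List.nil_append,
      PySem.List.enumerate_eq_map_pyRange mylist "", List.flatMap_map, cells_eq_filter,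
      filter_flatMap]

-- each cell emits a given admissible line id at most once, exactly when it lies on that line
lemma gIds_count (i j : Int) (hi : 0 ≤ i) (hj : j ∈ PySem.List.pyRange 0 12 1) :
    (gIds i).count j = if (lineA j).contains i then 1 else 0 := by
  rw [PySem.List.mem_pyRange_one] at hj
  obtain ⟨hj1, hj2⟩ := hj
  by_cases h25 : i < 25
  · interval_cases i <;> interval_cases j <;> decide
  · have hg : gIds i = [] := by simp [gIds, h25]
    have hc : (lineA j).contains i = false := by
      interval_cases j <;> simp [lineA, linesA] <;> omega
    simp [hg]
    simpa using hc

lemma count_flatMap (l : List Int) (f : Int → List Int) (a : Int) :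
    (l.flatMap f).count a = (l.map fun x => (f x).count a).sum := by
  induction l with
  | nil => simp
  | cons x xs ih => simp [List.count_append, ih]

lemma countP_mem_comm (l1 l2 : List Int) (h1 : l1.Nodup) (h2 : l2.Nodup) :
    l1.countP (fun x => l2.contains x) = l2.countP (fun x => l1.contains x) := by
  rw [List.countP_eq_length_filter, List.countP_eq_length_filter]
  rw [← List.toFinset_card_of_nodup (h1.filter _), ← List.toFinset_card_of_nodup (h2.filter _)]
  congr 1
  ext x
  simp
  tauto

-- the counted ids give exactly A's per-line counts
lemma count_eq_aNum (mylist : List String) (j : Int) (hj : j ∈ PySem.List.pyRange 0 12 1) :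
    ((PySem.List.count (bIds mylist) j : Nat) : Int) = aNum (getMyselfCells mylist) (lineA j) := by
  have hmem : ∀ i ∈ getMyselfCells mylist, 0 ≤ i := by
    intro i hi
    rw [cells_eq_filter] at hi
    exact (PySem.List.mem_pyRange_one.mp (List.mem_filter.mp hi).1).1
  have hnodup_idx : (getMyselfCells mylist).Nodup := by
    rw [cells_eq_filter]
    exact (PySem.List.nodup_pyRange_one 0 (PySem.List.len mylist)).filter _
  have hnodup_line : (lineA j).Nodup := by
    rw [PySem.List.mem_pyRange_one] at hj
    obtain ⟨h1, h2⟩ := hj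
    interval_cases j <;> decide
  rw [PySem.List.count_eq, bIds_eq, count_flatMap]
  have hmap : (getMyselfCells mylist).map (fun x => (gIds x).count j)
      = (getMyselfCells mylist).map (fun x => if (lineA j).contains x then 1 else 0) := by
    apply List.map_congr_left
    intro i hi
    exact gIds_count i j (hmem i hi) hj
  rw [hmap, PySem.List.sum_map_ite_one_zero_nat, countP_mem_comm _ _ hnodup_idx hnodup_line,
      aNum_eq]

-- B's loop equals the generic line loop
lemma bLoop_eq_loopA (mylist : List String) (js : List Int) (w : Int)
    (h : ∀ j ∈ js, ((PySem.List.count (bIds mylist) j : Nat) : Int) = aNum (getMyselfCells mylist) (lineA j)) :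
    bLoop (bIds mylist) js w =
      match loopA (getMyselfCells mylist) (js.map lineA) w with
      | none => 1000000000
      | some w' => w' := by
  induction js generalizing w with
  | nil => rfl
  | cons j js ih =>
    have hj := h j (List.mem_cons_self ..)
    simp only [bLoop, List.map_cons, loopA, ← hj]
    split_ifs with h5
    · rfl
    · rw [ih _ (fun j hj => h j (List.mem_cons_of_mem _ hj))]
      rw [show aAddSq ((PySem.List.count (bIds mylist) j : Nat) : Int) w
            = w + PySem.Int.floordiv
                (((PySem.List.count (bIds mylist) j : Nat) : Int) * (((PySem.List.count (bIds mylist) j : Nat) : Int) + 1)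
                  * (2 * ((PySem.List.count (bIds mylist) j : Nat) : Int) + 1)) 6 by
        rw [aAddSq_eq, sqsum_closed]]

-- ===== VERDICT (by name: the statement is the Claim_ definition above) =====
theorem generateWeightMyself_spec : Claim_equal_generateWeightMyself := by
  intro mylist _
  unfold Spec_generateWeightMyself generateWeightMyself_alt
  rw [A_eq_loopA, bLoop_eq_loopA mylist _ _ (fun j hj => count_eq_aNum mylist j hj)]
  rw [show (PySem.List.pyRange 0 12 1).map lineA = linesA by decide]
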